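-- pv_equiv track=rewrite | github.com/Noahyt/4450_fall_2021 | 2/analyze/analyze_michell_truss.py | assign_node_reference
-- ===== SOURCE A (Python) =====
-- def assign_node_reference(
--         nodes, upper_fix_ref=0, lower_fix_ref=1, start_number=2):
--     """Creates node number assignment."""
--     a = 2
--     upper_references = []
--     lower_references = []
--     for sheet in nodes:
--         ur = [upper_fix_ref]
--         lr = [lower_fix_ref]
--
--         # Remove support node.
--         sheet = sheet[1:]
--
--         if len(sheet) > 1:
--             for n in sheet[:-1]:
--                 # add to uper reference.
--                 ur.append(a)
--                 a = a + 1
--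
--                 # add to lower_reference.
--                 lr.append(a)
--                 a = a + 1
--
--         # Add center node to both.
--         ur.append(a)
--         lr.append(a)
--         a = a + 1
--
--         upper_references.append(ur)
--         lower_references.append(lr)
--
--     return upper_references, lower_references
-- ===== SOURCE B (Python) =====
-- def assign_node_reference(
--         nodes, upper_fix_ref=0, lower_fix_ref=1, start_number=2):
--     """Creates node number assignment (staged-pass version)."""
--     # Pass 1: number of interior element pairs per sheet.
--     ms = [max(len(s) - 2, 0) for s in nodes]
--     # Pass 2: prefix-sum list of starting counters (2m+1 numbers per sheet).
--     offs = [2]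
--     for m in ms:
--         offs.append(offs[-1] + 2 * m + 1)
--     # Pass 3: build each reference list from its offset in closed form.
--     upper = [[upper_fix_ref] + list(range(a, a + 2 * m, 2)) + [a + 2 * m]
--              for a, m in zip(offs, ms)]
--     lower = [[lower_fix_ref] + list(range(a + 1, a + 2 * m, 2)) + [a + 2 * m]
--              for a, m in zip(offs, ms)]
--     return upper, lower
-- ===== Notes on version B (the rewrite author's own statement) =====
-- stated objective: alternative
-- what changed: Replaces A's single stateful pass (counter incremented twice per interior node inside a nested loop) with three staged passes: sheet sizes, a prefix-sum list of starting counters, then each reference list built in closed form with range() and zip.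
import Mathlib
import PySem

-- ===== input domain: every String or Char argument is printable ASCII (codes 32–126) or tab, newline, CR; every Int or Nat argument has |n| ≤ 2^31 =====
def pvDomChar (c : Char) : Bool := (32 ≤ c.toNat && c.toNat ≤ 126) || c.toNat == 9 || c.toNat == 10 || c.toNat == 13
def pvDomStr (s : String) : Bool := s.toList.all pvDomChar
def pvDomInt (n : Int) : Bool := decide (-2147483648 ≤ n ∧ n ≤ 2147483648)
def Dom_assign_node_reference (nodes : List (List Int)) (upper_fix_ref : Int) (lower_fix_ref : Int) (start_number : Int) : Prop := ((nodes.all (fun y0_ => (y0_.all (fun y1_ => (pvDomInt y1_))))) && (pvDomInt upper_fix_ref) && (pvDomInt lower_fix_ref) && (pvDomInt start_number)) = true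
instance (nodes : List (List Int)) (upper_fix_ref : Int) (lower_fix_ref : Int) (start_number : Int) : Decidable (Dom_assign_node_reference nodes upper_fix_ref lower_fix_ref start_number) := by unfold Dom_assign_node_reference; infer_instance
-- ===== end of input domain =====

-- B replaces A's single stateful counter loop with three staged passes (sizes, prefix-sum
-- offsets, closed-form range lists); the two programs ignore start_number, as the Python does.

-- ===== PORT A =====
-- per-sheet step of A's outer loop; sheet[1:] is ported as List.drop 1 (exact for a
-- nonnegative start on a list) and sheet[:-1] as List.dropLast (exact).
def anrStepA (upper_fix_ref lower_fix_ref : Int)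
    (st : Int × List (List Int) × List (List Int)) (sheet : List Int) :
    Int × List (List Int) × List (List Int) :=
  let a := st.1
  let sheet' := sheet.drop 1
  let inner :=
    if sheet'.length > 1 then
      sheet'.dropLast.foldl
        (fun (s : List Int × List Int × Int) _ =>
          (s.1 ++ [s.2.2], s.2.1 ++ [s.2.2 + 1], s.2.2 + 2))
        ([upper_fix_ref], [lower_fix_ref], a)
    else ([upper_fix_ref], [lower_fix_ref], a)
  (inner.2.2 + 1,
   st.2.1 ++ [inner.1 ++ [inner.2.2]],
   st.2.2 ++ [inner.2.1 ++ [inner.2.2]])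

def assign_node_reference (nodes : List (List Int)) (upper_fix_ref : Int) (lower_fix_ref : Int) (start_number : Int) : List (List Int) × List (List Int) :=
  let fin := nodes.foldl (anrStepA upper_fix_ref lower_fix_ref) (2, [], [])
  (fin.2.1, fin.2.2)

-- ===== PORT B =====
-- max(len(s) - 2, 0): number of interior element pairs of a sheet.
def anrM (sheet : List Int) : Int := max ((sheet.length : Int) - 2) 0

-- offs[-1] on the always-nonempty offsets list is ported as getLast?.getD 0 (exact here).
def assign_node_reference_alt (nodes : List (List Int)) (upper_fix_ref : Int) (lower_fix_ref : Int) (start_number : Int) : List (List Int) × List (List Int) :=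
  let ms := nodes.map anrM
  let offs := ms.foldl (fun o m => o ++ [(o.getLast?.getD 0) + 2 * m + 1]) [2]
  let upper := (offs.zip ms).map (fun p =>
    [upper_fix_ref] ++ PySem.List.pyRange p.1 (p.1 + 2 * p.2) 2 ++ [p.1 + 2 * p.2])
  let lower := (offs.zip ms).map (fun p =>
    [lower_fix_ref] ++ PySem.List.pyRange (p.1 + 1) (p.1 + 2 * p.2) 2 ++ [p.1 + 2 * p.2])
  (upper, lower)

-- ===== PRECONDITION & SPEC =====
def Spec_assign_node_reference (nodes : List (List Int)) (upper_fix_ref : Int) (lower_fix_ref : Int) (start_number : Int) (out : List (List Int) × List (List Int)) : Prop := out = assign_node_reference_alt nodes upper_fix_ref lower_fix_ref start_number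
instance (nodes : List (List Int)) (upper_fix_ref : Int) (lower_fix_ref : Int) (start_number : Int) (out : List (List Int) × List (List Int)) : Decidable (Spec_assign_node_reference nodes upper_fix_ref lower_fix_ref start_number out) := by unfold Spec_assign_node_reference; infer_instance

-- ===== CLAIM (what is proved, stated in full; the proofs are below) =====
def Claim_equal_assign_node_reference : Prop := ∀ (nodes : List (List Int)) (upper_fix_ref : Int) (lower_fix_ref : Int) (start_number : Int), Dom_assign_node_reference nodes upper_fix_ref lower_fix_ref start_number → Spec_assign_node_reference nodes upper_fix_ref lower_fix_ref start_number (assign_node_reference nodes upper_fix_ref lower_fix_ref start_number)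

-- ===== LEMMAS AND PROOFS =====

-- reference specification both ports are reduced to: per-sheet lists from start counter a
def anrSpecU (u a : Int) : List Int → List (List Int)
  | [] => []
  | m :: ms => ([u] ++ PySem.List.pyRange a (a + 2 * m) 2 ++ [a + 2 * m])
      :: anrSpecU u (a + 2 * m + 1) ms

def anrSpecL (l a : Int) : List Int → List (List Int)
  | [] => []
  | m :: ms => ([l] ++ PySem.List.pyRange (a + 1) (a + 2 * m) 2 ++ [a + 2 * m])
      :: anrSpecL l (a + 2 * m + 1) ms

-- A's inner loop over a list of length n appends a, a+2, … to ur and a+1, a+3, … to lr,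
-- advancing the counter by 2n.
theorem anr_inner_eq (xs ur lr : List Int) (a : Int) :
    xs.foldl
      (fun (s : List Int × List Int × Int) _ =>
        (s.1 ++ [s.2.2], s.2.1 ++ [s.2.2 + 1], s.2.2 + 2))
      (ur, lr, a)
    = (ur ++ (List.range xs.length).map (fun (k : Nat) => a + 2 * (k : Int)),
       lr ++ (List.range xs.length).map (fun (k : Nat) => a + 1 + 2 * (k : Int)),
       a + 2 * xs.length) := by
  induction xs generalizing ur lr a with
  | nil => simp
  | cons x xs ih =>
    rw [List.foldl_cons, ih]
    have hmap1 : (List.range (xs.length + 1)).map (fun (k : Nat) => a + 2 * (k : Int))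
        = a :: (List.range xs.length).map (fun (k : Nat) => (a + 2) + 2 * (k : Int)) := by
      rw [List.range_succ_eq_map, List.map_cons, List.map_map]
      norm_num
      intro k _
      ring
    have hmap2 : (List.range (xs.length + 1)).map (fun (k : Nat) => a + 1 + 2 * (k : Int))
        = (a + 1) :: (List.range xs.length).map (fun (k : Nat) => (a + 2) + 1 + 2 * (k : Int)) := by
      rw [List.range_succ_eq_map, List.map_cons, List.map_map]
      norm_num
      intro k _
      ring
    refine Prod.ext ?_ (Prod.ext ?_ ?_)
    · simp [hmap1]
    · simp [hmap2]
    · simp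
      ring

-- range(a, a+2m, 2) in closed map form
theorem anr_pyRange_even (a : Int) (m : Nat) :
    PySem.List.pyRange a (a + 2 * m) 2 = (List.range m).map (fun (k : Nat) => a + 2 * (k : Int)) := by
  rw [PySem.List.pyRange_of_pos _ _ (by norm_num)]
  rcases Nat.eq_zero_or_pos m with h | h
  · simp [h]
  · have hlt : a < a + 2 * m := by omega
    rw [if_pos hlt]
    have hc : ((a + 2 * (m : Int) - a + 2 - 1) / 2).toNat = m := by omega
    rw [hc]

-- range(a+1, a+2m, 2) in closed map form
theorem anr_pyRange_odd (a : Int) (m : Nat) :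
    PySem.List.pyRange (a + 1) (a + 2 * m) 2 = (List.range m).map (fun (k : Nat) => a + 1 + 2 * (k : Int)) := by
  rw [PySem.List.pyRange_of_pos _ _ (by norm_num)]
  rcases Nat.eq_zero_or_pos m with h | h
  · simp [h]
  · have hlt : a + 1 < a + 2 * m := by omega
    rw [if_pos hlt]
    have hc : ((a + 2 * (m : Int) - (a + 1) + 2 - 1) / 2).toNat = m := by omega
    rw [hc]

-- A's per-sheet step in closed form, with m = anrM sheet
theorem anr_stepA_closed (u l : Int) (st : Int × List (List Int) × List (List Int)) (sheet : List Int) :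
    anrStepA u l st sheet
      = (st.1 + 2 * anrM sheet + 1,
         st.2.1 ++ [[u] ++ PySem.List.pyRange st.1 (st.1 + 2 * anrM sheet) 2 ++ [st.1 + 2 * anrM sheet]],
         st.2.2 ++ [[l] ++ PySem.List.pyRange (st.1 + 1) (st.1 + 2 * anrM sheet) 2 ++ [st.1 + 2 * anrM sheet]]) := by
  simp only [anrStepA]
  by_cases h : 2 < sheet.length
  · have hlen : (sheet.drop 1).length > 1 := by simp; omega
    have hdl : (sheet.drop 1).dropLast.length = sheet.length - 2 := by simp; omega
    have hm : anrM sheet = ((sheet.length - 2 : Nat) : Int) := by unfold anrM; omega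
    rw [if_pos hlen, anr_inner_eq, hdl, hm, anr_pyRange_even, anr_pyRange_odd]
  · have hlen : ¬ (sheet.drop 1).length > 1 := by simp; omega
    have hm : anrM sheet = 0 := by unfold anrM; omega
    rw [if_neg hlen, hm]
    have he : PySem.List.pyRange st.1 st.1 2 = [] := by
      simpa using anr_pyRange_even st.1 0
    have ho : PySem.List.pyRange (st.1 + 1) st.1 2 = [] := by
      simpa using anr_pyRange_odd st.1 0
    simp [he, ho]

-- A's whole fold reduced to the reference specification
theorem anr_foldA_eq (u l : Int) (nodes : List (List Int)) (a : Int) (U L : List (List Int)) :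
    nodes.foldl (anrStepA u l) (a, U, L)
      = ((nodes.map anrM).foldl (fun c m => c + 2 * m + 1) a,
         U ++ anrSpecU u a (nodes.map anrM),
         L ++ anrSpecL l a (nodes.map anrM)) := by
  induction nodes generalizing a U L with
  | nil => simp [anrSpecU, anrSpecL]
  | cons s ns ih =>
    rw [List.foldl_cons, anr_stepA_closed, ih]
    simp [anrSpecU, anrSpecL]

-- the offsets list B builds, in recursive closed form
def anrOffs (a : Int) : List Int → List Int
  | [] => [a]
  | m :: ms => a :: anrOffs (a + 2 * m + 1) ms

theorem anr_offs_fold (ms : List Int) (o : List Int) (a : Int) :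
    ms.foldl (fun o m => o ++ [(o.getLast?.getD 0) + 2 * m + 1]) (o ++ [a])
      = o ++ anrOffs a ms := by
  induction ms generalizing o a with
  | nil => simp [anrOffs]
  | cons m ms ih =>
    rw [List.foldl_cons]
    have hl : ((o ++ [a]).getLast?.getD 0) = a := by simp
    rw [hl, ih (o ++ [a]) (a + 2 * m + 1)]
    simp [anrOffs]

theorem anr_zipU (u : Int) (ms : List Int) (a : Int) :
    ((anrOffs a ms).zip ms).map (fun p =>
        [u] ++ PySem.List.pyRange p.1 (p.1 + 2 * p.2) 2 ++ [p.1 + 2 * p.2])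
      = anrSpecU u a ms := by
  induction ms generalizing a with
  | nil => simp [anrOffs, anrSpecU]
  | cons m ms ih =>
    rw [anrOffs, anrSpecU, List.zip_cons_cons, List.map_cons, ih]

theorem anr_zipL (l : Int) (ms : List Int) (a : Int) :
    ((anrOffs a ms).zip ms).map (fun p =>
        [l] ++ PySem.List.pyRange (p.1 + 1) (p.1 + 2 * p.2) 2 ++ [p.1 + 2 * p.2])
      = anrSpecL l a ms := by
  induction ms generalizing a with
  | nil => simp [anrOffs, anrSpecL]
  | cons m ms ih =>
    rw [anrOffs, anrSpecL, List.zip_cons_cons, List.map_cons, ih]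

-- ===== VERDICT (by name: the statement is the Claim_ definition above) =====
theorem assign_node_reference_spec : Claim_equal_assign_node_reference := by
  intro nodes u l s _
  unfold Spec_assign_node_reference assign_node_reference assign_node_reference_alt
  rw [anr_foldA_eq]
  have hoffs : (nodes.map anrM).foldl
      (fun o m => o ++ [(o.getLast?.getD 0) + 2 * m + 1]) [2]
      = anrOffs 2 (nodes.map anrM) := by
    simpa using anr_offs_fold (nodes.map anrM) [] 2
  simp only [hoffs, anr_zipU, anr_zipL]
  simp
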